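-- pv_equiv track=rewrite | github.com/Shane-Bowen/ML_Assignment_3 | Assignment_3.py | num_coefficients_2
-- ===== SOURCE A (Python) =====
-- def num_coefficients_2(d):
--     t = 0
--     for n in range(d+1):
--         for i in range(n+1):
--             for j in range(n+1):
--                 if i+j==n:
--                     t = t+1
--     return t
-- ===== SOURCE B (Python) =====
-- def num_coefficients_2(d):
--     if d < 0:
--         return 0
--     return (d + 1) * (d + 2) // 2
-- ===== Notes on version B (the rewrite author's own statement) =====
-- stated objective: faster
-- what changed: Replaces the cubic triple nested loop counting pairs (i,j) with i+j=n by a constant-time closed-form triangular-number formula (zero for negative degree).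
import Mathlib
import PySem

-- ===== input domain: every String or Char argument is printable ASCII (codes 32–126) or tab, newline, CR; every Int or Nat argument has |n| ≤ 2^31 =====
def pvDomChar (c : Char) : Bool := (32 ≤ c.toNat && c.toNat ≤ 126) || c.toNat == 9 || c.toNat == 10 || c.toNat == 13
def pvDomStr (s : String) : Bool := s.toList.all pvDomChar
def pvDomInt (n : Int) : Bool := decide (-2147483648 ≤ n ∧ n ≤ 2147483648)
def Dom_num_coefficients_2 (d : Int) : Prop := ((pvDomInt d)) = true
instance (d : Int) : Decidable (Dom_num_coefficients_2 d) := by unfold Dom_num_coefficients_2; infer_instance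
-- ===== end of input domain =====

-- B replaces A's O(d^3) triple loop by the closed form (d+1)(d+2)/2 (0 for negative d): faster.

-- ===== PORT A =====
def num_coefficients_2 (d : Int) : Int :=
  (PySem.List.pyRange 0 (d + 1) 1).foldl (fun t n =>
    (PySem.List.pyRange 0 (n + 1) 1).foldl (fun t i =>
      (PySem.List.pyRange 0 (n + 1) 1).foldl (fun t j =>
        if i + j = n then t + 1 else t) t) t) 0

-- ===== PORT B =====
def num_coefficients_2_alt (d : Int) : Int :=
  if d < 0 then 0 else PySem.Int.floordiv ((d + 1) * (d + 2)) 2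

-- ===== PRECONDITION & SPEC =====
def Spec_num_coefficients_2 (d : Int) (out : Int) : Prop := out = num_coefficients_2_alt d
instance (d : Int) (out : Int) : Decidable (Spec_num_coefficients_2 d out) := by unfold Spec_num_coefficients_2; infer_instance

-- ===== CLAIM (what is proved, stated in full; the proofs are below) =====
def Claim_equal_num_coefficients_2 : Prop := ∀ (d : Int), Dom_num_coefficients_2 d → Spec_num_coefficients_2 d (num_coefficients_2 d)

-- ===== LEMMAS AND PROOFS =====

-- the innermost j-loop adds exactly 1 when 0 ≤ i ≤ n
lemma inner_loop (n i t : Int) (h0 : 0 ≤ i) (h1 : i ≤ n) :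
    (PySem.List.pyRange 0 (n + 1) 1).foldl (fun t j => if i + j = n then t + 1 else t) t = t + 1 := by
  rw [PySem.List.foldl_ite_add_one]
  have hmem : (n - i) ∈ PySem.List.pyRange 0 (n + 1) 1 := by
    rw [PySem.List.mem_pyRange_one]; omega
  have hnd := PySem.List.nodup_pyRange_one (a := 0) (b := n + 1)
  have hcp : (PySem.List.pyRange 0 (n + 1) 1).countP (fun j => decide (i + j = n)) = 1 := by
    have : (PySem.List.pyRange 0 (n + 1) 1).countP (fun j => decide (i + j = n))
        = (PySem.List.pyRange 0 (n + 1) 1).count (n - i) := by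
      unfold List.count
      apply List.countP_congr
      intro x _
      have hx : (i + x = n) ↔ (x = n - i) := by omega
      simp [hx]
    rw [this, List.count_eq_one_of_mem hnd hmem]
  rw [hcp]; simp

-- the middle i-loop adds n+1
lemma mid_loop (n t : Int) (hn : 0 ≤ n) :
    (PySem.List.pyRange 0 (n + 1) 1).foldl (fun t i =>
      (PySem.List.pyRange 0 (n + 1) 1).foldl (fun t j => if i + j = n then t + 1 else t) t) t
    = t + (n + 1) := by
  have hcong : (PySem.List.pyRange 0 (n + 1) 1).foldl (fun t i =>
      (PySem.List.pyRange 0 (n + 1) 1).foldl (fun t j => if i + j = n then t + 1 else t) t) t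
      = (PySem.List.pyRange 0 (n + 1) 1).foldl (fun t _ => t + 1) t := by
    apply PySem.List.foldl_congr_mem
    intro t i hi
    rw [PySem.List.mem_pyRange_one] at hi
    exact inner_loop n i t hi.1 (by omega)
  rw [hcong, PySem.List.foldl_add (g := fun _ => (1 : Int))]
  simp [PySem.List.length_pyRange_one]
  omega

-- sum over n of (n+1), naturally indexed
lemma outer_sum (m : Nat) :
    (PySem.List.pyRange 0 (m : Int) 1).foldl (fun t n => t + (n + 1)) 0
      = ((m : Int) * ((m : Int) + 1)) / 2 := by
  induction m with
  | zero => simp [PySem.List.pyRange_one_eq_nil]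
  | succ k ih =>
    have h : ((k + 1 : Nat) : Int) = (k : Int) + 1 := by push_cast; ring
    rw [h, PySem.List.pyRange_one_succ_right (by positivity), List.foldl_append, ih]
    simp only [List.foldl_cons, List.foldl_nil]
    have h2 : ((k : Int) + 1) * ((k : Int) + 1 + 1) = (k : Int) * ((k : Int) + 1) + 2 * ((k : Int) + 1) := by ring
    omega

theorem num_coefficients_2_spec : Claim_equal_num_coefficients_2 := by
  intro d _
  unfold Spec_num_coefficients_2 num_coefficients_2 num_coefficients_2_alt
  by_cases hneg : d < 0
  · rw [PySem.List.pyRange_one_eq_nil (by omega)]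
    simp [hneg]
  · rw [not_lt] at hneg
    have hcong : (PySem.List.pyRange 0 (d + 1) 1).foldl (fun t n =>
        (PySem.List.pyRange 0 (n + 1) 1).foldl (fun t i =>
          (PySem.List.pyRange 0 (n + 1) 1).foldl (fun t j =>
            if i + j = n then t + 1 else t) t) t) 0
        = (PySem.List.pyRange 0 (d + 1) 1).foldl (fun t n => t + (n + 1)) 0 := by
      apply PySem.List.foldl_congr_mem
      intro t n hn
      rw [PySem.List.mem_pyRange_one] at hn
      exact mid_loop n t hn.1
    rw [hcong]
    have hm : ((d + 1).toNat : Int) = d + 1 := by omega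
    rw [← hm, outer_sum (d + 1).toNat, hm]
    have hfd : PySem.Int.floordiv ((d + 1) * (d + 2)) 2 = ((d + 1) * (d + 2)) / 2 := by
      unfold PySem.Int.floordiv
      exact Int.fdiv_eq_ediv_of_nonneg _ (by norm_num)
    rw [if_neg (by omega), hfd]
    ring_nf
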